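-- pv_equiv track=rewrite | github.com/Haj1h0/programmers_solutions_python | level_1/부족한 금액 계산하기.py | solution
-- ===== SOURCE A (Python) =====
-- def solution(price, money, count):
--     cnt = 0
--     for i in range(1,count+1):
--         cnt += i
--
--     if money - price * cnt >= 0:
--         return 0
--     else:
--         return price * cnt - money
-- ===== SOURCE B (Python) =====
-- def solution(price, money, count):
--     n = count if count > 0 else 0
--     total = price * n * (n + 1) // 2
--     shortfall = total - money
--     return shortfall if shortfall > 0 else 0
-- ===== Notes on version B (the rewrite author's own statement) =====
-- stated objective: faster
-- what changed: Replaces the O(count) accumulation loop with the closed-form Gauss sum count*(count+1)//2 and a max-style shortfall expression.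
import Mathlib
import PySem

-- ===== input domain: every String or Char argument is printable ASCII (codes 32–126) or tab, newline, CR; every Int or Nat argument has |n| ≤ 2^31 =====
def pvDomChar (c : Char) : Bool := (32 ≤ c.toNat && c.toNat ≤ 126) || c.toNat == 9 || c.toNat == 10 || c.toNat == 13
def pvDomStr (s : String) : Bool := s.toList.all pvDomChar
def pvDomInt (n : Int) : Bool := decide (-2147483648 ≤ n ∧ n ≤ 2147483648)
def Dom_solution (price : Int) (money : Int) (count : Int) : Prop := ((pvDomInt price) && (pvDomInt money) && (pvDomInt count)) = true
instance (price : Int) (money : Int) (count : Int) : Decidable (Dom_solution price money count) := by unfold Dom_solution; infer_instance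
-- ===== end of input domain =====

-- B replaces A's O(count) accumulation loop with the closed-form Gauss sum (O(1)); equivalence proved on all ints.


-- ===== PORT A =====
def solution (price : Int) (money : Int) (count : Int) : Int :=
  let cnt := (PySem.List.pyRange 1 (count + 1) 1).foldl (fun acc i => acc + i) 0
  if money - price * cnt ≥ 0 then 0 else price * cnt - money

-- ===== PORT B =====
def solution_alt (price : Int) (money : Int) (count : Int) : Int :=
  let n := if count > 0 then count else 0
  let total := PySem.Int.floordiv (price * n * (n + 1)) 2
  let shortfall := total - money
  if shortfall > 0 then shortfall else 0

-- ===== PRECONDITION & SPEC =====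
def Spec_solution (price : Int) (money : Int) (count : Int) (out : Int) : Prop := out = solution_alt price money count
instance (price : Int) (money : Int) (count : Int) (out : Int) : Decidable (Spec_solution price money count out) := by unfold Spec_solution; infer_instance

-- ===== CLAIM (what is proved, stated in full; the proofs are below) =====
def Claim_equal_solution : Prop := ∀ (price : Int) (money : Int) (count : Int), Dom_solution price money count → Spec_solution price money count (solution price money count)

-- ===== LEMMAS AND PROOFS =====

-- Gauss: twice the loop's sum over range(1, n+1) is n*(n+1)
theorem pv_sum_pyRange (n : Nat) :
    ((PySem.List.pyRange 1 ((n : Int) + 1) 1).foldl (fun acc i => acc + i) 0) * 2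
      = (n : Int) * ((n : Int) + 1) := by
  induction n with
  | zero => simp [PySem.List.pyRange_one_eq_nil]
  | succ k ih =>
    have h : PySem.List.pyRange 1 ((k : Int) + 1 + 1) 1
        = PySem.List.pyRange 1 ((k : Int) + 1) 1 ++ [(k : Int) + 1] :=
      PySem.List.pyRange_one_succ_right (by omega)
    push_cast
    rw [show ((k : Int) + 1 + 1) = ((k : Int) + 1) + 1 from rfl, h, List.foldl_append]
    simp only [List.foldl]
    linear_combination ih

theorem solution_spec : Claim_equal_solution := by
  intro price money count _
  unfold Spec_solution solution solution_alt
  by_cases hc : 0 < count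
  · have hn : ((count.toNat : Int)) = count := Int.toNat_of_nonneg (le_of_lt hc)
    have hsum := pv_sum_pyRange count.toNat
    rw [hn] at hsum
    set S := (PySem.List.pyRange 1 (count + 1) 1).foldl (fun acc i => acc + i) 0 with hS
    have htot : PySem.Int.floordiv (price * count * (count + 1)) 2 = price * S := by
      have : price * count * (count + 1) = (price * S) * 2 := by
        rw [mul_assoc, ← hsum]; ring
      rw [this, PySem.Int.floordiv_eq_ediv_of_pos (by norm_num),
        Int.mul_ediv_cancel _ (by norm_num)]
    simp only [if_pos hc, htot]
    split_ifs <;> omega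
  · have hnil : PySem.List.pyRange 1 (count + 1) 1 = [] :=
      PySem.List.pyRange_one_eq_nil (by omega)
    rw [hnil]
    simp only [List.foldl, if_neg hc, mul_zero, zero_mul,
      PySem.Int.floordiv, mul_zero]
    norm_num [Int.fdiv]
    split_ifs <;> omega

-- ===== VERDICT (by name: the statement is the Claim_ definition above) =====
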